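-- pv_equiv track=rewrite | github.com/wrietersco/quran-research-software | src/chat/step5_engine.py | ordinal_to_combo
-- ===== SOURCE A (Python) =====
-- def ordinal_to_combo(ordinal: int, entry_counts: list[int]) -> tuple[int, ...]:
--     if ordinal < 0:
--         raise ValueError("ordinal must be >= 0")
--     if not entry_counts:
--         return ()
--     combo_rev: list[int] = []
--     rem = int(ordinal)
--     for base in reversed(entry_counts):
--         b = max(1, int(base))
--         combo_rev.append((rem % b) + 1)  # one-based entry index
--         rem //= b
--     return tuple(reversed(combo_rev))
-- ===== SOURCE B (Python) =====
-- def ordinal_to_combo(ordinal: int, entry_counts: list[int]) -> tuple[int, ...]: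
--     if ordinal < 0:
--         raise ValueError("ordinal must be >= 0")
--     if not entry_counts:
--         return ()
--     n = int(ordinal)
--     bases = [max(1, int(b)) for b in entry_counts]
--     # place value of each position = product of the bases to its right,
--     # frozen once it exceeds n (the digit is then 1 either way, keeps ints small)
--     places = []
--     p = 1
--     for b in reversed(bases):
--         places.append(p)
--         if p <= n:
--             p *= b
--     places.reverse()
--     return tuple((n // place) % b + 1 for b, place in zip(bases, places))
-- ===== Notes on version B (the rewrite author's own statement) =====
-- stated objective: alternative
-- what changed: Instead of a running remainder repeatedly taken mod/divided right-to-left and then reversed, B precomputes each position's place value (suffix product of the clamped bases, frozen once it exceeds the ordinal) and emits every one-based digit directly in forward order as (ordinal // place) % base + 1, with no final reversal of the output.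
import Mathlib
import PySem

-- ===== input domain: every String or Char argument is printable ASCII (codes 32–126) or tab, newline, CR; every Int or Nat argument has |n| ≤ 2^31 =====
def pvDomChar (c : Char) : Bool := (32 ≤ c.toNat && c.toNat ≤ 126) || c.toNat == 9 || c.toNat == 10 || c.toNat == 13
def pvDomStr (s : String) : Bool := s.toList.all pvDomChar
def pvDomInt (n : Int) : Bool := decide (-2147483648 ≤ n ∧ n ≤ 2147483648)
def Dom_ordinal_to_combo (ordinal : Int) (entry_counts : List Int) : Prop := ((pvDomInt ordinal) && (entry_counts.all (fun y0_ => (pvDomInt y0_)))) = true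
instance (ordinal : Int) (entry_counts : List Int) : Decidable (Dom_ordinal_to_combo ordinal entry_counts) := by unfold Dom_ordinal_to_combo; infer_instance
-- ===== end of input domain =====

-- B replaces A's running-remainder loop (right-to-left, reversed at the end) by
-- precomputed place values (suffix products of the clamped bases) and emits each
-- one-based digit directly in forward order (place values frozen once they exceed the ordinal); same cost, different decomposition.

-- ===== PORT A =====
-- the loop 'for base in reversed(entry_counts)': consumes the reversed list,
-- carrying rem; the digits are produced in append order (here: cons order).
def aLoop : List Int → Int → List Int
  | [], _ => []
  | base :: rest, rem =>
    let b := max 1 base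
    (PySem.Int.mod rem b + 1) :: aLoop rest (PySem.Int.floordiv rem b)

def ordinal_to_combo (ordinal : Int) (entry_counts : List Int) : List Int :=
  if entry_counts = [] then []
  else (aLoop entry_counts.reverse ordinal).reverse

-- ===== PORT B =====
-- 'for b in reversed(bases): places.append(p); if p <= n: p *= b'
def placesLoop (n : Int) : List Int → Int → List Int
  | [], _ => []
  | b :: rest, p => p :: placesLoop n rest (if p ≤ n then p * b else p)

def ordinal_to_combo_alt (ordinal : Int) (entry_counts : List Int) : List Int :=
  if entry_counts = [] then []
  else
    let bases := entry_counts.map (fun x => max 1 x)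
    let places := (placesLoop ordinal bases.reverse 1).reverse
    (bases.zip places).map (fun bp => PySem.Int.mod (PySem.Int.floordiv ordinal bp.2) bp.1 + 1)

-- ===== PRECONDITION & SPEC =====
-- Pre_ excludes exactly the inputs where A raises ValueError (negative ordinal).
def Pre_ordinal_to_combo (ordinal : Int) (entry_counts : List Int) : Prop := 0 ≤ ordinal
instance (ordinal : Int) (entry_counts : List Int) : Decidable (Pre_ordinal_to_combo ordinal entry_counts) := by unfold Pre_ordinal_to_combo; infer_instance
def pvWitness_ordinal_to_combo : Int × List Int := (5, [2, 3])

def Spec_ordinal_to_combo (ordinal : Int) (entry_counts : List Int) (out : List Int) : Prop := out = ordinal_to_combo_alt ordinal entry_counts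
instance (ordinal : Int) (entry_counts : List Int) (out : List Int) : Decidable (Spec_ordinal_to_combo ordinal entry_counts out) := by unfold Spec_ordinal_to_combo; infer_instance

-- ===== CLAIM (what is proved, stated in full; the proofs are below) =====
def Claim_equal_ordinal_to_combo : Prop := ∀ (ordinal : Int) (entry_counts : List Int), Dom_ordinal_to_combo ordinal entry_counts → Pre_ordinal_to_combo ordinal entry_counts → Spec_ordinal_to_combo ordinal entry_counts (ordinal_to_combo ordinal entry_counts)

-- ===== LEMMAS AND PROOFS =====

theorem placesLoop_length (n : Int) (l : List Int) (p : Int) : (placesLoop n l p).length = l.length := by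
  induction l generalizing p with
  | nil => rfl
  | cons b rest ih => simp [placesLoop, ih]

-- core invariant: processing the reversed list with running remainder n / p produces,
-- position by position, B's direct digits paired with the growing place value p.
theorem aLoop_eq (l : List Int) (n p q : Int) (hn : 0 ≤ n) (hp : 0 < p) (hq : 0 < q)
    (hpq : q = p ∨ (n < q ∧ n < p)) :
    aLoop l (n / p) =
      ((l.map (fun x => max 1 x)).zip (placesLoop n (l.map (fun x => max 1 x)) q)).map
        (fun bp => PySem.Int.mod (PySem.Int.floordiv n bp.2) bp.1 + 1) := by
  induction l generalizing p q with
  | nil => rfl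
  | cons base rest ih =>
    have hb : (0:Int) < max 1 base := by omega
    have hnq : n / q = n / p := by
      rcases hpq with rfl | ⟨h1, h2⟩
      · rfl
      · rw [Int.ediv_eq_zero_of_lt hn h1, Int.ediv_eq_zero_of_lt hn h2]
    have hfd : PySem.Int.floordiv n q = n / p := by
      rw [PySem.Int.floordiv_eq_ediv_of_pos hq, hnq]
    have hdiv : PySem.Int.floordiv (n / p) (max 1 base) = n / (p * max 1 base) := by
      rw [PySem.Int.floordiv_eq_ediv_of_pos hb, Int.ediv_ediv_of_nonneg (le_of_lt hp)]
    simp only [List.map, placesLoop, List.zip_cons_cons, aLoop, hfd, hdiv]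
    congr 1
    refine ih (p * max 1 base) (if q ≤ n then q * max 1 base else q) (by positivity) ?_ ?_
    · split <;> positivity
    · by_cases hle : q ≤ n
      · simp only [hle, if_pos]
        rcases hpq with rfl | ⟨h1, _⟩
        · exact Or.inl rfl
        · omega
      · simp only [hle, ite_false]
        refine Or.inr ⟨by omega, ?_⟩
        rcases hpq with rfl | ⟨_, h2⟩
        · calc n < q := by omega
               _ ≤ q * max 1 base := le_mul_of_one_le_right (le_of_lt hq) (by omega)
        · calc n < p := h2
               _ ≤ p * max 1 base := le_mul_of_one_le_right (le_of_lt hp) (by omega)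

theorem zip_reverse_eq {α β : Type} (l1 : List α) (l2 : List β) (h : l1.length = l2.length) :
    l1.reverse.zip l2.reverse = (l1.zip l2).reverse := by
  induction l1 generalizing l2 with
  | nil => cases l2 <;> simp_all
  | cons a t1 ih =>
    cases l2 with
    | nil => simp at h
    | cons b t2 =>
      simp only [List.reverse_cons, List.zip_cons_cons]
      rw [List.zip_append (by simp_all), ih t2 (by simpa using h)]
      simp

theorem zip_reverse_places (n : Int) (bs : List Int) :
    bs.zip ((placesLoop n bs.reverse 1).reverse)
      = ((bs.reverse.zip (placesLoop n bs.reverse 1))).reverse := by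
  have := zip_reverse_eq bs.reverse (placesLoop n bs.reverse 1)
    (by simp [placesLoop_length])
  simpa using this

-- ===== VERDICT (by name: the statement is the Claim_ definition above) =====
theorem ordinal_to_combo_spec : Claim_equal_ordinal_to_combo := by
  intro ordinal entry_counts _ hpre
  unfold Spec_ordinal_to_combo ordinal_to_combo ordinal_to_combo_alt
  by_cases h : entry_counts = []
  · simp [h]
  · simp only [h, ite_false]
    have h1 : ordinal / 1 = ordinal := Int.ediv_one ordinal
    have := aLoop_eq entry_counts.reverse ordinal 1 1 hpre one_pos one_pos (Or.inl rfl)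
    rw [h1] at this
    rw [this, zip_reverse_places, List.map_reverse, List.map_reverse]
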